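-- pv_equiv track=rewrite | github.com/Shadowrom2020/KlipperVault | src/klipper_macro_explainer.py | _collapse_multiline_jinja_blocks
-- ===== SOURCE A (Python) =====
-- from typing import Any, Mapping, Sequence, TypedDict
--
-- def _strip_inline_comment(line: str) -> str:
--     """Strip inline '#' comments while preserving hash markers inside quotes."""
--     in_single = False
--     in_double = False
--
--     for idx, char in enumerate(line):
--         if char == "'" and not in_double:
--             in_single = not in_single
--             continue
--         if char == '"' and not in_single:
--             in_double = not in_double
--             continue
--         if char == "#" and not in_single and not in_double:
--             return line[:idx]
--     return line
--
-- def _collapse_multiline_jinja_blocks(body_lines: Sequence[str]) -> list[tuple[int, str]]: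
--     """Merge multiline Jinja blocks into single logical explainer lines.
--
--     Macros often split ``{% ... %}`` or ``{{ ... }}`` blocks across lines.
--     Explaining those lines independently can misclassify continuation lines.
--     """
--     collapsed: list[tuple[int, str]] = []
--     idx = 0
--     total = len(body_lines)
--
--     while idx < total:
--         raw_line = body_lines[idx]
--         stripped = _strip_inline_comment(raw_line.strip()).strip()
--
--         if stripped.startswith("{%") and not stripped.endswith("%}"):
--             start_line = idx + 1
--             parts = [raw_line]
--             idx += 1
--             while idx < total:
--                 parts.append(body_lines[idx])
--                 candidate = _strip_inline_comment(body_lines[idx].strip()).strip()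
--                 idx += 1
--                 if candidate.endswith("%}"):
--                     break
--             collapsed.append((start_line, "\n".join(parts)))
--             continue
--
--         if stripped.startswith("{{") and not stripped.endswith("}}"):
--             start_line = idx + 1
--             parts = [raw_line]
--             idx += 1
--             while idx < total:
--                 parts.append(body_lines[idx])
--                 candidate = _strip_inline_comment(body_lines[idx].strip()).strip()
--                 idx += 1
--                 if candidate.endswith("}}"):
--                     break
--             collapsed.append((start_line, "\n".join(parts)))
--             continue
--
--         collapsed.append((idx + 1, raw_line))
--         idx += 1
--
--     return collapsed
-- ===== SOURCE B (Python) =====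
-- from typing import Sequence
--
--
-- def _strip_inline_comment(line: str) -> str:
--     """Strip inline '#' comments while preserving hash markers inside quotes."""
--     in_single = False
--     in_double = False
--
--     for idx, char in enumerate(line):
--         if char == "'" and not in_double:
--             in_single = not in_single
--             continue
--         if char == '"' and not in_single:
--             in_double = not in_double
--             continue
--         if char == "#" and not in_single and not in_double:
--             return line[:idx]
--     return line
--
--
-- def _collapse_multiline_jinja_blocks(body_lines: Sequence[str]) -> list[tuple[int, str]]:
--     """Merge multiline Jinja blocks into single logical explainer lines.
--
--     Single for-loop state machine: when inside an unclosed block we remember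
--     the start line, the accumulated parts and the expected closer.
--     """
--     collapsed: list[tuple[int, str]] = []
--     state = None  # None, or (closer, start_line, parts)
--
--     for lineno, raw_line in enumerate(body_lines, 1):
--         if state is None:
--             stripped = _strip_inline_comment(raw_line.strip()).strip()
--             if stripped.startswith("{%") and not stripped.endswith("%}"):
--                 state = ("%}", lineno, [raw_line])
--             elif stripped.startswith("{{") and not stripped.endswith("}}"):
--                 state = ("}}", lineno, [raw_line])
--             else:
--                 collapsed.append((lineno, raw_line))
--         else:
--             closer, start_line, parts = state
--             parts.append(raw_line)
--             if _strip_inline_comment(raw_line.strip()).strip().endswith(closer):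
--                 collapsed.append((start_line, "\n".join(parts)))
--                 state = None
--
--     if state is not None:
--         closer, start_line, parts = state
--         collapsed.append((start_line, "\n".join(parts)))
--     return collapsed
-- ===== Notes on version B (the rewrite author's own statement) =====
-- stated objective: simpler
-- what changed: Replaced the explicit index with two nested while-loops (inner loops duplicated per block kind) by a single for-loop over enumerate driven by an in-block state (closer, start line, parts), with an EOF flush.
import Mathlib
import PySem

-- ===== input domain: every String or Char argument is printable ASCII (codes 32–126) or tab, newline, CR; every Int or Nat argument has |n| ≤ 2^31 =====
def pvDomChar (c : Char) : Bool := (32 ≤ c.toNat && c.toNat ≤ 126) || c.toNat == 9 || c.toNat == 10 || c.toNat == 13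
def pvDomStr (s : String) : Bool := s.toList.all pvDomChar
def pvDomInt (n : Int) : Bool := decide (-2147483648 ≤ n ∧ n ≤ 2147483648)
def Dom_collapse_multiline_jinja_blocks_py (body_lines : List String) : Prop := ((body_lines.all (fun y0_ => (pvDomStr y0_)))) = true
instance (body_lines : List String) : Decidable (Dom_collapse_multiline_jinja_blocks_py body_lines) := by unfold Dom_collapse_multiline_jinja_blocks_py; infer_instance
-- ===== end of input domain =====

-- B replaces A's explicit index and two nested while-loops by one for-loop state machine; return value only, neither mutates its argument.

-- shared helper (identical in Source A and Source B): _strip_inline_comment.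
-- Walks the characters with in_single/in_double flags; on an unquoted '#'
-- Python returns line[:idx], i.e. exactly the characters already passed,
-- so the recursion returns the kept prefix directly (exact).
def stripCommentChars : List Char → Bool → Bool → List Char
  | [], _, _ => []
  | c :: cs, inS, inD =>
    if c = '\'' ∧ ¬ inD then c :: stripCommentChars cs (!inS) inD
    else if c = '"' ∧ ¬ inS then c :: stripCommentChars cs inS (!inD)
    else if c = '#' ∧ ¬ inS ∧ ¬ inD then []
    else c :: stripCommentChars cs inS inD

def stripInlineComment (line : String) : String :=
  String.ofList (stripCommentChars line.toList false false)

-- _strip_inline_comment(raw.strip()).strip()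
def cleanLine (raw : String) : String :=
  PySem.Str.strip (stripInlineComment (PySem.Str.strip raw))

-- ===== PORT A =====
-- A's inner 'while idx < total: parts.append(...); idx += 1; if candidate.endswith(closer): break'
-- (A's two inner loops differ only in the closer literal); idx is the 0-based index, rest = body_lines[idx:];
-- returns (appended parts, next idx, remaining lines).
def innerA (idx : Nat) (rest : List String) (closer : String) : List String × Nat × List String :=
  match rest with
  | [] => ([], idx, [])
  | x :: xs =>
    if PySem.Str.endswith (cleanLine x) closer then ([x], idx + 1, xs)
    else
      let r := innerA (idx + 1) xs closer
      (x :: r.1, r.2.1, r.2.2)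

-- A's outer 'while idx < total'; fuel is a pure totality device (the loop advances idx by at
-- least 1 per iteration, so fuel = number of remaining lines never runs out; proved below).
def loopA : Nat → Nat → List String → List (Int × String)
  | 0, _, _ => []
  | fuel + 1, idx, rest =>
    match rest with
    | [] => []
    | raw :: xs =>
      let stripped := cleanLine raw
      if PySem.Str.startswith stripped "{%" ∧ ¬ PySem.Str.endswith stripped "%}" then
        let r := innerA (idx + 1) xs "%}"
        ((idx : Int) + 1, PySem.Str.join "\n" (raw :: r.1)) :: loopA fuel r.2.1 r.2.2
      else if PySem.Str.startswith stripped "{{" ∧ ¬ PySem.Str.endswith stripped "}}" then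
        let r := innerA (idx + 1) xs "}}"
        ((idx : Int) + 1, PySem.Str.join "\n" (raw :: r.1)) :: loopA fuel r.2.1 r.2.2
      else
        ((idx : Int) + 1, raw) :: loopA fuel (idx + 1) xs

def collapse_multiline_jinja_blocks_py (body_lines : List String) : List (Int × String) :=
  loopA body_lines.length 0 body_lines

-- ===== PORT B =====
-- B's single for-loop over enumerate(body_lines, 1) with state = none | some (closer, start_line, parts).
def loopB (lines : List (Int × String)) (state : Option (String × Int × List String))
    (collapsed : List (Int × String)) : List (Int × String) :=
  match lines with
  | [] =>
    match state with
    | none => collapsed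
    | some (_, start_line, parts) => collapsed ++ [(start_line, PySem.Str.join "\n" parts)]
  | (lineno, raw) :: rest =>
    match state with
    | none =>
      let stripped := cleanLine raw
      if PySem.Str.startswith stripped "{%" ∧ ¬ PySem.Str.endswith stripped "%}" then
        loopB rest (some ("%}", lineno, [raw])) collapsed
      else if PySem.Str.startswith stripped "{{" ∧ ¬ PySem.Str.endswith stripped "}}" then
        loopB rest (some ("}}", lineno, [raw])) collapsed
      else
        loopB rest none (collapsed ++ [(lineno, raw)])
    | some (closer, start_line, parts) =>
      let parts := parts ++ [raw]
      if PySem.Str.endswith (cleanLine raw) closer then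
        loopB rest none (collapsed ++ [(start_line, PySem.Str.join "\n" parts)])
      else
        loopB rest (some (closer, start_line, parts)) collapsed

def collapse_multiline_jinja_blocks_py_alt (body_lines : List String) : List (Int × String) :=
  loopB (PySem.List.enumerate body_lines 1) none []

-- ===== PRECONDITION & SPEC =====
def Spec_collapse_multiline_jinja_blocks_py (body_lines : List String) (out : List (Int × String)) : Prop := out = collapse_multiline_jinja_blocks_py_alt body_lines
instance (body_lines : List String) (out : List (Int × String)) : Decidable (Spec_collapse_multiline_jinja_blocks_py body_lines out) := by unfold Spec_collapse_multiline_jinja_blocks_py; infer_instance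

-- ===== CLAIM (what is proved, stated in full; the proofs are below) =====
def Claim_equal_collapse_multiline_jinja_blocks_py : Prop := ∀ (body_lines : List String), Dom_collapse_multiline_jinja_blocks_py body_lines → Spec_collapse_multiline_jinja_blocks_py body_lines (collapse_multiline_jinja_blocks_py body_lines)

-- ===== LEMMAS AND PROOFS =====

-- A's inner loop only shortens the remaining line list (so the fuel in loopA suffices).
theorem innerA_rest_le (idx : Nat) (rest : List String) (closer : String) :
    (innerA idx rest closer).2.2.length ≤ rest.length := by
  induction rest generalizing idx with
  | nil => simp [innerA]
  | cons x xs ih =>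
    simp only [innerA]
    split
    · simp
    · exact Nat.le_succ_of_le (ih (idx + 1))

-- While in block state, B consumes exactly the lines A's inner loop consumes and
-- emits the joined block, then proceeds from the remainder with no state.
theorem loopB_inblock (xs : List String) (idx : Nat) (closer : String) (s : Int)
    (parts : List String) (acc : List (Int × String)) :
    loopB (PySem.List.enumerate xs ((idx : Int) + 1)) (some (closer, s, parts)) acc
      = loopB (PySem.List.enumerate (innerA idx xs closer).2.2 ((innerA idx xs closer).2.1 + 1))
          none (acc ++ [(s, PySem.Str.join "\n" (parts ++ (innerA idx xs closer).1))]) := by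
  induction xs generalizing idx parts acc with
  | nil => simp [innerA, loopB, PySem.List.enumerate]
  | cons x xs ih =>
    rw [PySem.List.enumerate_cons]
    simp only [loopB, innerA]
    split
    · push_cast; ring_nf
    · rw [show ((idx : Int) + 1 + 1) = ((idx + 1 : Nat) : Int) + 1 by push_cast; ring]
      rw [ih (idx + 1) (parts ++ [x]) acc]
      simp

-- Main invariant: with enough fuel, B's state machine run from a clean state equals A's outer loop.
theorem loopA_eq_loopB (fuel : Nat) : ∀ (rest : List String) (idx : Nat) (acc : List (Int × String)),
    rest.length ≤ fuel →
    loopB (PySem.List.enumerate rest ((idx : Int) + 1)) none acc = acc ++ loopA fuel idx rest := by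
  induction fuel with
  | zero =>
    intro rest idx acc h
    have : rest = [] := List.eq_nil_of_length_eq_zero (Nat.le_zero.mp h)
    subst this
    simp [loopA, loopB, PySem.List.enumerate]
  | succ n ih =>
    intro rest idx acc h
    match rest with
    | [] => simp [loopA, loopB, PySem.List.enumerate]
    | raw :: xs =>
      rw [PySem.List.enumerate_cons]
      simp only [loopA, loopB]
      have hxs : xs.length ≤ n := Nat.lt_succ_iff.mp (Nat.lt_of_lt_of_le (by simp) h)
      split
      · rw [show ((idx : Int) + 1 + 1) = ((idx + 1 : Nat) : Int) + 1 by push_cast; ring]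
        rw [loopB_inblock xs (idx + 1) "%}" ((idx : Int) + 1) [raw] acc]
        rw [ih _ _ _ (le_trans (innerA_rest_le (idx + 1) xs "%}") hxs)]
        simp
      · split
        · rw [show ((idx : Int) + 1 + 1) = ((idx + 1 : Nat) : Int) + 1 by push_cast; ring]
          rw [loopB_inblock xs (idx + 1) "}}" ((idx : Int) + 1) [raw] acc]
          rw [ih _ _ _ (le_trans (innerA_rest_le (idx + 1) xs "}}") hxs)]
          simp
        · rw [show ((idx : Int) + 1 + 1) = ((idx + 1 : Nat) : Int) + 1 by push_cast; ring]
          rw [ih _ _ _ hxs]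
          simp

-- ===== VERDICT (by name: the statement is the Claim_ definition above) =====
theorem collapse_multiline_jinja_blocks_py_spec : Claim_equal_collapse_multiline_jinja_blocks_py := by
  intro body_lines _
  unfold Spec_collapse_multiline_jinja_blocks_py
  unfold collapse_multiline_jinja_blocks_py collapse_multiline_jinja_blocks_py_alt
  have := loopA_eq_loopB body_lines.length body_lines 0 [] (le_refl _)
  simpa using this.symm
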